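-- pv_equiv track=rewrite | github.com/Packman700/encryption | Functions/decryption.py | len_decryption
-- ===== SOURCE A (Python) =====
-- def len_decryption(length, len_key):  # Split and decode len
--     first_part = []
--     second_part = []
--     one_num = ''
--     for index, character in enumerate(length):
--         one_num = one_num + character
--         if index % 7 == 6:
--             first_part.append(one_num[:5])
--             second_part.append(one_num[-2:])
--             one_num = ''
--
--     decoded_first = []
--     decoded_second = []
--
--     for first, second in zip(first_part, second_part):
--         decoded_first.append(len_key[first]) #
--         decoded_second.append(len_key[second])
--     dic = {'first': decoded_first, 'second': decoded_second}
--     return dic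
-- ===== SOURCE B (Python) =====
-- def len_decryption(length, len_key):  # Split and decode len
--     decoded_first = []
--     decoded_second = []
--     for i in range(len(length) // 7):
--         chunk = length[7 * i:7 * i + 7]
--         decoded_first.append(len_key[chunk[:5]])
--         decoded_second.append(len_key[chunk[5:7]])
--     return {'first': decoded_first, 'second': decoded_second}
-- ===== Notes on version B (the rewrite author's own statement) =====
-- stated objective: simpler
-- what changed: Replaces A's two sequential passes (a char-by-char accumulator with an index%7 flush test, then a zip loop of dict lookups) by a single loop over the complete 7-char groups that slices each chunk and looks both keys up immediately.
import Mathlib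
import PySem

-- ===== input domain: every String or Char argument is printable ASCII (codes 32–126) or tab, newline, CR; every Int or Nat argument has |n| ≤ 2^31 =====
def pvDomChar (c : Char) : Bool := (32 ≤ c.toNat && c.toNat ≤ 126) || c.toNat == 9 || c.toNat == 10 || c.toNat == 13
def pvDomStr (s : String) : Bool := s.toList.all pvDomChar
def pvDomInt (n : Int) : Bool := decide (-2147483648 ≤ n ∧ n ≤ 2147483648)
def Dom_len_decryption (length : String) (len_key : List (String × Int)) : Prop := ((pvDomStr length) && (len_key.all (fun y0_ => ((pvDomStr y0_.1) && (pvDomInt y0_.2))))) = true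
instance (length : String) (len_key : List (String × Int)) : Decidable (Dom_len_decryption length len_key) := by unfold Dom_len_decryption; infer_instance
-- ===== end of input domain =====

-- B replaces A's two sequential passes (char accumulator + zip-lookup loop) by one loop
-- over the complete 7-char groups that slices each chunk and looks both keys up directly.

-- dict lookup d[k] (first match; total form with default 0 — Pre_ guarantees the key is present)
def pvLookup (d : List (String × Int)) (k : String) : Int :=
  ((d.find? (fun p => p.1 == k)).map (·.2)).getD 0

-- ===== PORT A =====
-- loop body of A's first pass: append character, flush the 7-char group when index % 7 == 6
def pvStepA (s : List (List Char) × List (List Char) × List Char) (p : Int × Char) :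
    List (List Char) × List (List Char) × List Char :=
  let one_num := s.2.2 ++ [p.2]
  if PySem.Int.mod p.1 7 = 6 then
    (s.1 ++ [PySem.List.slice one_num none (some 5)],
     s.2.1 ++ [PySem.List.slice one_num (some (-2)) none],
     ([] : List Char))
  else (s.1, s.2.1, one_num)

-- loop body of A's second pass: decode a (first, second) pair via the key dict
def pvStepZip (len_key : List (String × Int)) (acc : List Int × List Int)
    (pr : List Char × List Char) : List Int × List Int :=
  (acc.1 ++ [pvLookup len_key (String.mk pr.1)],
   acc.2 ++ [pvLookup len_key (String.mk pr.2)])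

def len_decryption (length : String) (len_key : List (String × Int)) : List (String × List Int) :=
  let st := (PySem.List.enumerate length.toList 0).foldl pvStepA ([], [], [])
  let dec := (st.1.zip st.2.1).foldl (pvStepZip len_key) ([], [])
  [("first", dec.1), ("second", dec.2)]

-- ===== PORT B =====
-- loop body of B: slice the i-th complete 7-char chunk and decode both parts at once
def pvStepB (cs : List Char) (len_key : List (String × Int)) (acc : List Int × List Int)
    (i : Nat) : List Int × List Int :=
  let chunk := PySem.List.slice cs (some ((7 * i : Nat) : Int)) (some ((7 * i + 7 : Nat) : Int))
  (acc.1 ++ [pvLookup len_key (String.mk (PySem.List.slice chunk none (some 5)))],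
   acc.2 ++ [pvLookup len_key (String.mk (PySem.List.slice chunk (some 5) (some 7)))])

def len_decryption_alt (length : String) (len_key : List (String × Int)) : List (String × List Int) :=
  let cs := length.toList
  let dec := (List.range (cs.length / 7)).foldl (pvStepB cs len_key) ([], [])
  [("first", dec.1), ("second", dec.2)]

-- ===== PRECONDITION & SPEC =====
-- Pre_ excludes exactly the inputs on which Python A raises KeyError: some 5- or 2-char
-- part of a complete 7-char group of `length` is not a key of `len_key`.
def Pre_len_decryption (length : String) (len_key : List (String × Int)) : Prop :=
  ∀ i : Nat, i < length.toList.length / 7 →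
    (String.mk ((length.toList.drop (7 * i)).take 5)) ∈ len_key.map Prod.fst ∧
    (String.mk ((length.toList.drop (7 * i + 5)).take 2)) ∈ len_key.map Prod.fst
instance (length : String) (len_key : List (String × Int)) : Decidable (Pre_len_decryption length len_key) := by unfold Pre_len_decryption; infer_instance

def pvWitness_len_decryption : String × (List (String × Int)) :=
  ("abcdeXY", [("abcde", 3), ("XY", 12)])

def Spec_len_decryption (length : String) (len_key : List (String × Int)) (out : List (String × List Int)) : Prop := out = len_decryption_alt length len_key
instance (length : String) (len_key : List (String × Int)) (out : List (String × List Int)) : Decidable (Spec_len_decryption length len_key out) := by unfold Spec_len_decryption; infer_instance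

-- ===== CLAIM (what is proved, stated in full; the proofs are below) =====
def Claim_equal_len_decryption : Prop := ∀ (length : String) (len_key : List (String × Int)), Dom_len_decryption length len_key → Pre_len_decryption length len_key → Spec_len_decryption length len_key (len_decryption length len_key)

-- ===== LEMMAS AND PROOFS =====

-- the complete 7-char groups of a char list
def pvChunks (cs : List Char) : List (List Char) :=
  if h : 7 ≤ cs.length then cs.take 7 :: pvChunks (cs.drop 7) else []
termination_by cs.length
decreasing_by simp; omega

lemma pvChunks_short {cs : List Char} (h : cs.length < 7) : pvChunks cs = [] := by
  rw [pvChunks, dif_neg (by omega)]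

lemma pvChunks_cons {cs : List Char} (h : 7 ≤ cs.length) :
    pvChunks cs = cs.take 7 :: pvChunks (cs.drop 7) := by
  rw [pvChunks, dif_pos h]

lemma pvChunks_eq_map_range (cs : List Char) :
    pvChunks cs = (List.range (cs.length / 7)).map (fun i => (cs.drop (7 * i)).take 7) := by
  by_cases h : 7 ≤ cs.length
  · rw [pvChunks_cons h]
    have hlen : cs.length / 7 = (cs.drop 7).length / 7 + 1 := by
      simp only [List.length_drop]; omega
    rw [hlen, List.range_succ_eq_map, List.map_cons, List.map_map,
        pvChunks_eq_map_range (cs.drop 7)]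
    refine congrArg₂ List.cons (by simp) (List.map_congr_left fun a ha => ?_)
    simp only [Function.comp_apply, List.drop_drop]
    congr 2
    omega
  · rw [pvChunks_short (by omega), Nat.div_eq_of_lt (by omega)]
    simp
termination_by cs.length
decreasing_by simp; omega

lemma exists7 {cs : List Char} (h : 7 ≤ cs.length) :
    ∃ c0 c1 c2 c3 c4 c5 c6 rest, cs = c0 :: c1 :: c2 :: c3 :: c4 :: c5 :: c6 :: rest := by
  match cs with
  | c0 :: c1 :: c2 :: c3 :: c4 :: c5 :: c6 :: rest => exact ⟨_, _, _, _, _, _, _, _, rfl⟩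
  | [] | [_] | [_,_] | [_,_,_] | [_,_,_,_] | [_,_,_,_,_] | [_,_,_,_,_,_] => simp at h

lemma loopA_small (cs : List Char) : ∀ (k : Int) (o : List Char)
    (a1 a2 : List (List Char)), 0 ≤ k → k % 7 + cs.length ≤ 6 →
    ((PySem.List.enumerate cs k).foldl pvStepA (a1, a2, o)).1 = a1 ∧
    ((PySem.List.enumerate cs k).foldl pvStepA (a1, a2, o)).2.1 = a2 := by
  induction cs with
  | nil => intro k o a1 a2 _ _; simp [PySem.List.enumerate_nil]
  | cons c t ih =>
    intro k o a1 a2 hk h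
    rw [PySem.List.enumerate_cons, List.foldl_cons]
    have hm : ¬ (k % 7 = 6) := by simp at h; omega
    rw [show pvStepA (a1, a2, o) (k, c) = (a1, a2, o ++ [c]) from by
      simp [pvStepA, hm]]
    exact ih (k + 1) (o ++ [c]) a1 a2 (by omega) (by simp at h ⊢; omega)

lemma loopA_flush (c0 c1 c2 c3 c4 c5 c6 : Char) (rest : List Char) (k : Int)
    (a1 a2 : List (List Char)) (hk : 0 ≤ k) (h7 : k % 7 = 0) :
    (PySem.List.enumerate (c0 :: c1 :: c2 :: c3 :: c4 :: c5 :: c6 :: rest) k).foldl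
        pvStepA (a1, a2, []) =
    (PySem.List.enumerate rest (k + 7)).foldl pvStepA
        (a1 ++ [[c0, c1, c2, c3, c4]], a2 ++ [[c5, c6]], []) := by
  simp only [PySem.List.enumerate_cons, List.foldl_cons]
  rw [show pvStepA (a1, a2, ([] : List Char)) (k, c0) = (a1, a2, [c0]) from by
    simp [pvStepA, show ¬(k % 7 = 6) from by omega]]
  rw [show pvStepA (a1, a2, [c0]) (k + 1, c1) = (a1, a2, [c0, c1]) from by
    simp [pvStepA, show ¬((k + 1) % 7 = 6) from by omega]]
  rw [show pvStepA (a1, a2, [c0, c1]) (k + 1 + 1, c2) = (a1, a2, [c0, c1, c2]) from by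
    simp [pvStepA, show ¬((k + 1 + 1) % 7 = 6) from by omega]]
  rw [show pvStepA (a1, a2, [c0, c1, c2]) (k + 1 + 1 + 1, c3) = (a1, a2, [c0, c1, c2, c3]) from by
    simp [pvStepA, show ¬((k + 1 + 1 + 1) % 7 = 6) from by omega]]
  rw [show pvStepA (a1, a2, [c0, c1, c2, c3]) (k + 1 + 1 + 1 + 1, c4) = (a1, a2, [c0, c1, c2, c3, c4]) from by
    simp [pvStepA, show ¬((k + 1 + 1 + 1 + 1) % 7 = 6) from by omega]]
  rw [show pvStepA (a1, a2, [c0, c1, c2, c3, c4]) (k + 1 + 1 + 1 + 1 + 1, c5) = (a1, a2, [c0, c1, c2, c3, c4, c5]) from by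
    simp [pvStepA, show ¬((k + 1 + 1 + 1 + 1 + 1) % 7 = 6) from by omega]]
  rw [show pvStepA (a1, a2, [c0, c1, c2, c3, c4, c5]) (k + 1 + 1 + 1 + 1 + 1 + 1, c6) =
      (a1 ++ [[c0, c1, c2, c3, c4]], a2 ++ [[c5, c6]], ([] : List Char)) from by
    simp [pvStepA, show (k + 1 + 1 + 1 + 1 + 1 + 1) % 7 = 6 from by omega,
      PySem.List.slice, PySem.List.clampIdx]]
  rw [show k + 1 + 1 + 1 + 1 + 1 + 1 + 1 = k + 7 by ring]

lemma loopA_main (n : Nat) : ∀ (cs : List Char), cs.length ≤ n →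
    ∀ (k : Int) (a1 a2 : List (List Char)), 0 ≤ k → k % 7 = 0 →
    ((PySem.List.enumerate cs k).foldl pvStepA (a1, a2, [])).1 =
      a1 ++ (pvChunks cs).map (List.take 5) ∧
    ((PySem.List.enumerate cs k).foldl pvStepA (a1, a2, [])).2.1 =
      a2 ++ (pvChunks cs).map (List.drop 5) := by
  induction n with
  | zero =>
    intro cs hn k a1 a2 hk h7
    constructor
    · rw [(loopA_small cs k [] a1 a2 hk (by omega)).1, pvChunks_short (by omega)]; simp
    · rw [(loopA_small cs k [] a1 a2 hk (by omega)).2, pvChunks_short (by omega)]; simp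
  | succ n ihn =>
    intro cs hn k a1 a2 hk h7
    by_cases h : 7 ≤ cs.length
    · obtain ⟨c0, c1, c2, c3, c4, c5, c6, rest, rfl⟩ := exists7 h
      rw [loopA_flush c0 c1 c2 c3 c4 c5 c6 rest k a1 a2 hk h7]
      have ih := ihn rest (by simp at hn; omega) (k + 7) (a1 ++ [[c0, c1, c2, c3, c4]])
        (a2 ++ [[c5, c6]]) (by omega) (by omega)
      rw [pvChunks_cons (by simpa using h)]
      simp only [List.take_succ_cons, List.take_zero, List.drop_succ_cons, List.drop_zero,
        List.map_cons] at ih ⊢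
      refine ⟨?_, ?_⟩
      · rw [ih.1]; simp
      · rw [ih.2]; simp
    · constructor
      · rw [(loopA_small cs k [] a1 a2 hk (by omega)).1, pvChunks_short (by omega)]; simp
      · rw [(loopA_small cs k [] a1 a2 hk (by omega)).2, pvChunks_short (by omega)]; simp

lemma foldPairs {α : Type} (u v : α → Int) (l : List α) : ∀ acc1 acc2 : List Int,
    l.foldl (fun acc x => (acc.1 ++ [u x], acc.2 ++ [v x])) (acc1, acc2) =
      (acc1 ++ l.map u, acc2 ++ l.map v) := by
  induction l with
  | nil => intro acc1 acc2; simp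
  | cons x t ih => intro acc1 acc2; rw [List.foldl_cons, ih]; simp

-- ===== VERDICT (by name: the statement is the Claim_ definition above) =====
theorem len_decryption_spec : Claim_equal_len_decryption := by
  intro length len_key _ _
  unfold Spec_len_decryption len_decryption len_decryption_alt
  have hA := loopA_main (length.toList).length length.toList le_rfl 0 [] []
    (by norm_num) (by norm_num)
  set cs := length.toList with hcs
  set st := (PySem.List.enumerate cs 0).foldl pvStepA ([], [], []) with hst
  simp only [List.nil_append] at hA
  have hzipA : st.1.zip st.2.1 = (pvChunks cs).map (fun g => (g.take 5, g.drop 5)) := by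
    rw [hA.1, hA.2, List.zip_map']
  have hdecA : (st.1.zip st.2.1).foldl (pvStepZip len_key) ([], []) =
      ((pvChunks cs).map (fun g => pvLookup len_key (String.mk (g.take 5))),
       (pvChunks cs).map (fun g => pvLookup len_key (String.mk (g.drop 5)))) := by
    rw [hzipA, show pvStepZip len_key = fun (acc : List Int × List Int) pr =>
        (acc.1 ++ [pvLookup len_key (String.mk pr.1)],
         acc.2 ++ [pvLookup len_key (String.mk pr.2)]) from rfl,
      foldPairs, List.map_map, List.map_map]
    simp [Function.comp_def]
  have hdecB : (List.range (cs.length / 7)).foldl (pvStepB cs len_key) ([], []) =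
      ((List.range (cs.length / 7)).map (fun i => pvLookup len_key (String.mk
          (PySem.List.slice (PySem.List.slice cs (some ((7 * i : Nat) : Int))
            (some ((7 * i + 7 : Nat) : Int))) none (some 5)))),
       (List.range (cs.length / 7)).map (fun i => pvLookup len_key (String.mk
          (PySem.List.slice (PySem.List.slice cs (some ((7 * i : Nat) : Int))
            (some ((7 * i + 7 : Nat) : Int))) (some 5) (some 7))))) := by
    rw [show pvStepB cs len_key = fun (acc : List Int × List Int) (i : Nat) =>
        (acc.1 ++ [pvLookup len_key (String.mk
          (PySem.List.slice (PySem.List.slice cs (some ((7 * i : Nat) : Int))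
            (some ((7 * i + 7 : Nat) : Int))) none (some 5)))],
         acc.2 ++ [pvLookup len_key (String.mk
          (PySem.List.slice (PySem.List.slice cs (some ((7 * i : Nat) : Int))
            (some ((7 * i + 7 : Nat) : Int))) (some 5) (some 7)))]) from rfl,
      foldPairs]
    simp
  dsimp only
  rw [hdecA, hdecB]
  have hchunk : ∀ i ∈ List.range (cs.length / 7),
      PySem.List.slice cs (some ((7 * i : Nat) : Int)) (some ((7 * i + 7 : Nat) : Int)) =
        (cs.drop (7 * i)).take 7 := by
    intro i _
    rw [PySem.List.slice_natCast]
    congr 1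
    omega
  have hlen7 : ∀ i ∈ List.range (cs.length / 7), ((cs.drop (7 * i)).take 7).length = 7 := by
    intro i hi
    rw [List.mem_range] at hi
    simp only [List.length_take, List.length_drop]
    omega
  have h1 : (pvChunks cs).map (fun g => pvLookup len_key (String.mk (g.take 5))) =
      (List.range (cs.length / 7)).map (fun i => pvLookup len_key (String.mk
        (PySem.List.slice (PySem.List.slice cs (some ((7 * i : Nat) : Int))
          (some ((7 * i + 7 : Nat) : Int))) none (some 5)))) := by
    rw [pvChunks_eq_map_range, List.map_map]
    refine List.map_congr_left fun i hi => ?_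
    simp only [Function.comp_apply]
    rw [hchunk i hi, PySem.List.slice_to _ (by norm_num : (0:Int) ≤ 5)]
    simp
  have h2 : (pvChunks cs).map (fun g => pvLookup len_key (String.mk (g.drop 5))) =
      (List.range (cs.length / 7)).map (fun i => pvLookup len_key (String.mk
        (PySem.List.slice (PySem.List.slice cs (some ((7 * i : Nat) : Int))
          (some ((7 * i + 7 : Nat) : Int))) (some 5) (some 7)))) := by
    rw [pvChunks_eq_map_range, List.map_map]
    refine List.map_congr_left fun i hi => ?_
    simp only [Function.comp_apply]
    rw [hchunk i hi, PySem.List.slice_toNat _ (by norm_num : (0:Int) ≤ 5) (by norm_num : (0:Int) ≤ 7)]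
    have htk : (((cs.drop (7 * i)).take 7).drop ((5:Int).toNat)).take ((7:Int).toNat - (5:Int).toNat)
        = ((cs.drop (7 * i)).take 7).drop 5 := by
      refine List.take_of_length_le ?_
      simp only [List.length_drop, hlen7 i hi]
      norm_num
    rw [htk]
  rw [h1, h2]
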